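-- pv_equiv track=rewrite | github.com/JJordann/tarok | src/api/util2.py | playable
-- ===== SOURCE A (Python) =====
-- def suit(card):
--     return card.split('_')[0]
--
-- def playable(hand, table):
--     # if table is empty, any card can be played
--     if table == []:
--         return hand
--
--     if suit(table[0]) != "tarok":
--         if any(suit(table[0]) == suit(card) for card in hand):
--             # if first card on table is not a tarot and player has card of same suit in hand,
--             # return all cards of the same suit
--             return [card for card in hand if suit(card) == suit(table[0])]
--         elif any(suit(card) == "tarok" for card in hand):
--             # else, if player has a tarot card, return all tarot cards in hand
--             return [card for card in hand if suit(card) == "tarok"]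
--         else:
--             return hand
--
--     # card on table is a tarot card
--     # if player has any tarot card in hand, return all tarot cards
--     if any(suit(card) == "tarok" for card in hand):
--         return [card for card in hand if suit(card) == "tarok"]
--     else:
--         # card on table is tarot, player does not have any tarot cards, return all cards
--         return hand
-- ===== SOURCE B (Python) =====
-- def suit(card):
--     return card.split('_')[0]
--
-- def playable(hand, table):
--     # Group the hand once by suit, then answer by lookup.
--     if table == []:
--         return hand
--     groups = {}
--     for card in hand:
--         groups.setdefault(suit(card), []).append(card)
--     required = suit(table[0])
--     if required != "tarok" and required in groups:
--         return groups[required]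
--     if "tarok" in groups:
--         return groups["tarok"]
--     return hand
-- ===== Notes on version B (the rewrite author's own statement) =====
-- stated objective: simpler
-- what changed: A rescans the hand with separate any()+comprehension passes per case; B groups the hand once into a suit->cards dict (order-preserving) and answers with two lookups.
import Mathlib
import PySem

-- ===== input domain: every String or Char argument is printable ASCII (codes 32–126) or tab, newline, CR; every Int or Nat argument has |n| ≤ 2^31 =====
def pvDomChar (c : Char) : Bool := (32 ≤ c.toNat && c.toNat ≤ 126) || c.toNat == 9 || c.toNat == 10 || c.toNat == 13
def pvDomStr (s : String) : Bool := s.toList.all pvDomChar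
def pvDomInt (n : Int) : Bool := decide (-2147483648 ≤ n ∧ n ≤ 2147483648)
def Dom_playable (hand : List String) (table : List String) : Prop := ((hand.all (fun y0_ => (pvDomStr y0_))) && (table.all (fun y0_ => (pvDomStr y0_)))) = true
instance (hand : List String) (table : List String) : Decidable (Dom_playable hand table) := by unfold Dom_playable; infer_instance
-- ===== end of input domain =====

-- B replaces A's repeated any()+comprehension scans of the hand by one grouping pass
-- into a suit→cards dict followed by lookups (objective: simpler control flow).

-- ===== PORT A =====
-- suit(card) = card.split('_')[0]  (shared module-level helper, used verbatim by both Pythons)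
def pySuit (card : String) : String :=
  PySem.List.pyGetD ((PySem.Str.split? card "_").getD []) 0 ""

def playable (hand : List String) (table : List String) : List String :=
  match table with
  | [] => hand
  | t0 :: _ =>
    if pySuit t0 ≠ "tarok" then
      if hand.any (fun card => pySuit t0 == pySuit card) then
        hand.filter (fun card => pySuit card == pySuit t0)
      else if hand.any (fun card => pySuit card == "tarok") then
        hand.filter (fun card => pySuit card == "tarok")
      else hand
    else
      if hand.any (fun card => pySuit card == "tarok") then
        hand.filter (fun card => pySuit card == "tarok")
      else hand

-- ===== PORT B =====
-- groups: one pass over the hand, suit → cards in hand order (dict via setdefault/append)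
def groupBySuit (hand : List String) : PySem.Dict String (List String) :=
  hand.foldl (fun d card => d.modify (pySuit card) [] (fun l => l ++ [card])) PySem.Dict.empty

def playable_alt (hand : List String) (table : List String) : List String :=
  match table with
  | [] => hand
  | t0 :: _ =>
    let groups := groupBySuit hand
    let required := pySuit t0
    if required ≠ "tarok" ∧ groups.contains required then
      groups.getD required []
    else if groups.contains "tarok" then
      groups.getD "tarok" []
    else hand

-- ===== PRECONDITION & SPEC =====
def Spec_playable (hand : List String) (table : List String) (out : List String) : Prop := out = playable_alt hand table
instance (hand : List String) (table : List String) (out : List String) : Decidable (Spec_playable hand table out) := by unfold Spec_playable; infer_instance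

-- ===== CLAIM (what is proved, stated in full; the proofs are below) =====
def Claim_equal_playable : Prop := ∀ (hand : List String) (table : List String), Dom_playable hand table → Spec_playable hand table (playable hand table)

-- ===== LEMMAS AND PROOFS =====

-- the grouped dict's entry at s is exactly A's filter of the hand by suit s
theorem getD_groupBySuit (hand : List String) (s : String) :
    (groupBySuit hand).getD s [] = hand.filter (fun card => pySuit card == s) := by
  unfold groupBySuit
  have h := PySem.Dict.getD_foldl_modify_append
      (hand.map (fun card => (pySuit card, card))) (PySem.Dict.empty) s
  rw [List.foldl_map] at h
  simpa [List.filter_map, List.map_map, Function.comp_def] using h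

-- membership in the grouped dict is A's any-scan of the hand for suit s
theorem contains_groupBySuit (hand : List String) (s : String) :
    (groupBySuit hand).contains s = hand.any (fun card => pySuit card == s) := by
  unfold groupBySuit
  rw [Bool.eq_iff_iff, PySem.Dict.contains_iff_mem_keys,
      PySem.Dict.keys_foldl_modify_key hand pySuit [] (fun d c l => l ++ [c]),
      PySem.Dict.keys_empty, PySem.Set.mem_update]
  simp only [List.any_eq_true, List.mem_map, beq_iff_eq, List.not_mem_nil, false_or]

-- ===== VERDICT (by name: the statement is the Claim_ definition above) =====
theorem playable_spec : Claim_equal_playable := by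
  intro hand table _
  unfold Spec_playable playable playable_alt
  cases table with
  | nil => rfl
  | cons t0 _ =>
    simp only [contains_groupBySuit, getD_groupBySuit]
    by_cases hs : pySuit t0 = "tarok"
    · simp [hs]
    · have hsym : (hand.any fun card => pySuit t0 == pySuit card)
          = (hand.any fun card => pySuit card == pySuit t0) := by
        rw [Bool.eq_iff_iff]
        simp only [List.any_eq_true, beq_iff_eq]
        constructor <;> rintro ⟨c, hc, he⟩ <;> exact ⟨c, hc, he.symm⟩
      by_cases h1 : (hand.any fun card => pySuit card == pySuit t0) = true
      · simp [hs, hsym, h1]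
      · simp only [Bool.not_eq_true] at h1
        by_cases h2 : (hand.any fun card => pySuit card == "tarok") = true
        · simp [hs, hsym, h1, h2]
        · simp only [Bool.not_eq_true] at h2
          simp [hs, hsym, h1, h2]
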